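-- pv_equiv track=rewrite | github.com/remisharoon/plombery-scraper | src/jobs_scrape_pipeline.py | _find_first_json_block
-- ===== SOURCE A (Python) =====
-- from typing import Optional
-- from typing import Any, Dict, List, Optional
--
-- def _find_first_json_block(s: str) -> Optional[str]:
--     """
--     Return first balanced {...} or [...] segment.
--     Honors string/escape context; won't break on braces inside strings.
--     """
--     s = s.strip()
--     start_idx = None
--     opener = None
--     depth = 0
--     in_str = False
--     esc = False
--     quote = None  # '"' or "'"
--
--     for i, ch in enumerate(s):
--         if start_idx is None:
--             if ch in "{[":
--                 start_idx = i
--                 opener = ch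
--                 depth = 1
--                 continue
--         else:
--             if in_str:
--                 if esc:
--                     esc = False
--                 elif ch == "\\":
--                     esc = True
--                 elif ch == quote:
--                     in_str = False
--                 # else stay in string
--             else:
--                 if ch in ('"', "'"):
--                     in_str = True
--                     quote = ch
--                 elif ch in "{[":
--                     depth += 1
--                 elif ch in "}]":
--                     depth -= 1
--                     if depth == 0:
--                         return s[start_idx : i + 1]
--                 # else normal char
--         # allow strings before first opener; ignore
--     return None
-- ===== SOURCE B (Python) =====
-- from typing import Optional
--
--
-- def _find_first_json_block(s: str) -> Optional[str]:
--     """Two-phase version: locate the first opener, then scan with a depth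
--     counter while building the block in a buffer (no slicing)."""
--     s = s.strip()
--     j = next((i for i, ch in enumerate(s) if ch in "{["), None)
--     if j is None:
--         return None
--     buf = [s[j]]
--     depth = 1
--     in_str = False
--     esc = False
--     quote = None
--     for ch in s[j + 1:]:
--         buf.append(ch)
--         if in_str:
--             if esc:
--                 esc = False
--             elif ch == "\\":
--                 esc = True
--             elif ch == quote:
--                 in_str = False
--         elif ch in ('"', "'"):
--             in_str = True
--             quote = ch
--         elif ch in "{[":
--             depth += 1
--         elif ch in "}]":
--             depth -= 1
--             if depth == 0:
--                 return "".join(buf)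
--     return None
-- ===== Notes on version B (the rewrite author's own statement) =====
-- stated objective: alternative
-- what changed: Replaces A's single state machine that threads an Option start index, an unused opener and string-state through every character with a two-phase version: first find the index of the first opener, then scan only the tail with depth/string state while accumulating the block in a buffer joined at the end instead of slicing by indices.
import Mathlib
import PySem

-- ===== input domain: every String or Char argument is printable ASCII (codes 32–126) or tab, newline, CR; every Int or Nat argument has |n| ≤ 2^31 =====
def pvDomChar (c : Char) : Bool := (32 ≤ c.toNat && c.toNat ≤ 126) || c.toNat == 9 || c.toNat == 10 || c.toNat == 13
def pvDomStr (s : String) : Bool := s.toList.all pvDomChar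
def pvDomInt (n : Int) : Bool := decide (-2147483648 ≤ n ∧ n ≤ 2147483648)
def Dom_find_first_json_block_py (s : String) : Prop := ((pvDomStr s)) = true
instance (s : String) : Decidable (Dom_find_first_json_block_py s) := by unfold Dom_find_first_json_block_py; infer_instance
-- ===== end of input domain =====

-- B changes the decomposition: find the first opener's index first, then scan the tail
-- accumulating the block in a buffer (objective: alternative; same O(n) cost).

-- ===== PORT A =====
-- A's single loop over (i, ch) with state (start_idx, depth, in_str, esc, quote);
-- the unused Python variable `opener` is dropped.  Structural recursion on `rest`,
-- `i` the current index into `full` (the stripped string), return = slice full[j:i+1].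
def loopA (full : List Char) (rest : List Char) (i : Nat) (start : Option Nat)
    (depth : Int) (instr esc : Bool) (quote : Option Char) : Option String :=
  match rest with
  | [] => none
  | ch :: rest' =>
    match start with
    | none =>
      if ch = '{' ∨ ch = '[' then
        loopA full rest' (i+1) (some i) 1 instr esc quote
      else
        loopA full rest' (i+1) none depth instr esc quote
    | some j =>
      if instr then
        if esc then loopA full rest' (i+1) (some j) depth instr false quote
        else if ch = '\\' then loopA full rest' (i+1) (some j) depth instr true quote
        else if some ch = quote then loopA full rest' (i+1) (some j) depth false esc quote
        else loopA full rest' (i+1) (some j) depth instr esc quote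
      else
        if ch = '"' ∨ ch = '\'' then loopA full rest' (i+1) (some j) depth true esc (some ch)
        else if ch = '{' ∨ ch = '[' then loopA full rest' (i+1) (some j) (depth+1) instr esc quote
        else if ch = '}' ∨ ch = ']' then
          if depth - 1 = 0 then
            some (String.ofList (PySem.List.slice full (some (j : Int)) (some ((i : Int) + 1))))
          else loopA full rest' (i+1) (some j) (depth-1) instr esc quote
        else loopA full rest' (i+1) (some j) depth instr esc quote

def find_first_json_block_py (s : String) : Option String :=
  let t := (PySem.Str.strip s).toList
  loopA t t 0 none 0 false false none

-- ===== PORT B =====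
-- B's tail scan: every char is appended to the buffer, depth/string state updated,
-- and the joined buffer returned when depth hits 0.
def loopB (rest : List Char) (buf : List Char) (depth : Int)
    (instr esc : Bool) (quote : Option Char) : Option String :=
  match rest with
  | [] => none
  | ch :: rest' =>
    let buf' := buf ++ [ch]
    if instr then
      if esc then loopB rest' buf' depth instr false quote
      else if ch = '\\' then loopB rest' buf' depth instr true quote
      else if some ch = quote then loopB rest' buf' depth false esc quote
      else loopB rest' buf' depth instr esc quote
    else if ch = '"' ∨ ch = '\'' then loopB rest' buf' depth true esc (some ch)
    else if ch = '{' ∨ ch = '[' then loopB rest' buf' (depth+1) instr esc quote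
    else if ch = '}' ∨ ch = ']' then
      if depth - 1 = 0 then some (String.ofList buf')
      else loopB rest' buf' (depth-1) instr esc quote
    else loopB rest' buf' depth instr esc quote

def find_first_json_block_py_alt (s : String) : Option String :=
  let t := (PySem.Str.strip s).toList
  match List.findIdx? (fun c => c == '{' || c == '[') t with
  | none => none
  | some j =>
    match t.drop j with
    | [] => none          -- unreachable: findIdx? returns an in-range index
    | ch :: rest => loopB rest [ch] 1 false false none

-- ===== PRECONDITION & SPEC =====
def Spec_find_first_json_block_py (s : String) (out : Option String) : Prop := out = find_first_json_block_py_alt s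
instance (s : String) (out : Option String) : Decidable (Spec_find_first_json_block_py s out) := by unfold Spec_find_first_json_block_py; infer_instance

-- ===== CLAIM (what is proved, stated in full; the proofs are below) =====
def Claim_equal_find_first_json_block_py : Prop := ∀ (s : String), Dom_find_first_json_block_py s → Spec_find_first_json_block_py s (find_first_json_block_py s)

-- ===== LEMMAS AND PROOFS =====

-- While start_idx is none, A only skips characters that are not openers.
theorem loopA_skip (full : List Char) (pre rest : List Char) (i : Nat)
    (d : Int) (st e : Bool) (q : Option Char)
    (h : ∀ c ∈ pre, ¬ (c = '{' ∨ c = '[')) :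
    loopA full (pre ++ rest) i none d st e q = loopA full rest (i + pre.length) none d st e q := by
  induction pre generalizing i with
  | nil => simp
  | cons c pre ih =>
    have hc := h c (by simp)
    simp only [List.cons_append, loopA, if_neg hc]
    rw [ih (i+1) (fun c hc => h c (by simp [hc]))]
    congr 1
    simp; omega

-- Main alignment: after the opener, A (index/slice form) and B (buffer form) agree.
theorem loopA_eq_loopB (rest : List Char) (full : List Char) (i j : Nat)
    (d : Int) (st e : Bool) (q : Option Char) (buf : List Char)
    (hj : j < i)
    (hbuf : buf = (full.take i).drop j)
    (hrest : rest = full.drop i) :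
    loopA full rest i (some j) d st e q = loopB rest buf d st e q := by
  induction rest generalizing i d st e q buf with
  | nil => simp [loopA, loopB]
  | cons ch rest' ih =>
    have hi : i < full.length := by
      by_contra hle
      have : full.drop i = [] := List.drop_eq_nil_of_le (by omega)
      rw [← hrest] at this; simp at this
    have hget : full[i] = ch := by
      have h0 : (full.drop i)[0]? = some ch := by rw [← hrest]; rfl
      rw [List.getElem?_drop] at h0
      simpa [List.getElem?_eq_getElem hi] using h0
    have hrest' : rest' = full.drop (i+1) := by
      have : full.drop (i+1) = (full.drop i).tail := by
        rw [List.tail_drop]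
      rw [this, ← hrest]; rfl
    have htake : full.take (i+1) = full.take i ++ [ch] := by
      rw [List.take_add_one]; simp [List.getElem?_eq_getElem hi, hget]
    have hbuf' : buf ++ [ch] = (full.take (i+1)).drop j := by
      rw [htake, List.drop_append_of_le_length (by simp; omega), hbuf]
    have hslice : PySem.List.slice full (some (j : Int)) (some ((i : Int) + 1))
        = buf ++ [ch] := by
      have : ((i : Int) + 1) = ((i + 1 : Nat) : Int) := by push_cast; ring
      rw [this, PySem.List.slice_natCast, hbuf']
      rw [List.drop_take]
    simp only [loopA, loopB]
    split_ifs <;>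
      first
        | (exact ih _ _ _ _ _ _ (by omega) hbuf' hrest')
        | (rw [hslice])
-- A on the whole stripped list equals B's two-phase computation.
theorem main_eq (t : List Char) :
    loopA t t 0 none 0 false false none =
      (match List.findIdx? (fun c => c == '{' || c == '[') t with
       | none => none
       | some j =>
         match t.drop j with
         | [] => none
         | ch :: rest => loopB rest [ch] 1 false false none) := by
  cases hf : List.findIdx? (fun c => c == '{' || c == '[') t with
  | none =>
    have hnone : ∀ c ∈ t, ¬ (c = '{' ∨ c = '[') := by
      intro c hc
      have := List.findIdx?_eq_none_iff.mp hf c hc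
      simp only [Bool.or_eq_false_iff, beq_eq_false_iff_ne, ne_eq] at this
      tauto
    have h := loopA_skip t t [] 0 0 false false none hnone
    simpa using h
  | some j =>
    obtain ⟨hjlt, hp, hmin⟩ := List.findIdx?_eq_some_iff_getElem.mp hf
    have hop : t[j] = '{' ∨ t[j] = '[' := by
      simp only [Bool.or_eq_true, beq_iff_eq] at hp
      exact hp
    have hdropj : t.drop j = t[j] :: t.drop (j+1) := List.drop_eq_getElem_cons hjlt
    have hpre : ∀ c ∈ t.take j, ¬ (c = '{' ∨ c = '[') := by
      intro c hc
      obtain ⟨k, hk, hck⟩ := List.getElem_of_mem hc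
      have hkj : k < j := by simp at hk; omega
      have hmk := hmin k hkj
      have hck' : c = t[k] := by rw [← hck]; simp [List.getElem_take]
      subst hck'
      simp only [Bool.or_eq_true, beq_iff_eq, not_or] at hmk
      tauto
    have hsplit : t = t.take j ++ t.drop j := (List.take_append_drop j t).symm
    have hskip := loopA_skip t (t.take j) (t.drop j) 0 0 false false none hpre
    rw [← hsplit] at hskip
    rw [hskip]
    have hlen : 0 + (t.take j).length = j := by simp; omega
    rw [hlen]
    show loopA t (List.drop j t) j none 0 false false none =
      (match List.drop j t with
       | [] => none
       | ch :: rest => loopB rest [ch] 1 false false none)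
    rw [hdropj]
    simp only [loopA, if_pos hop]
    exact loopA_eq_loopB _ t (j+1) j 1 false false none [t[j]] (by omega)
      (by rw [List.drop_take, hdropj, Nat.add_sub_cancel_left]; rfl)
      rfl

-- ===== VERDICT (by name: the statement is the Claim_ definition above) =====
theorem find_first_json_block_py_spec : Claim_equal_find_first_json_block_py := by
  intro s _
  show find_first_json_block_py s = find_first_json_block_py_alt s
  unfold find_first_json_block_py find_first_json_block_py_alt
  exact main_eq ((PySem.Str.strip s).toList)
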